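-- pv_equiv track=rewrite | github.com/lumigo-io/python_tracer | src/lumigo_tracer/kinesis_service.py | _parse_kinesis_results_to_lists
-- ===== SOURCE A (Python) =====
-- from typing import Callable, Any, List, Dict, Tuple, Optional
--
-- ALLOW_RETRY_ERROR_CODES = [
--     "ProvisionedThroughputExceededException",
--     "ThrottlingException",
--     "ServiceUnavailable",
--     "ProvisionedThroughputExceededException",
--     "RequestExpired",
-- ]
--
-- def _parse_kinesis_results_to_lists(kinesis_result: dict) -> Tuple[list, list]:
--     parsed_items = [
--         (index, item.get("ErrorCode"))
--         for (index, item) in enumerate(kinesis_result.get("Records", []))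
--         if item.get("ErrorCode")
--     ]
--     retry_items = [item for item in parsed_items if item[1] in ALLOW_RETRY_ERROR_CODES]
--     bad_items = [item for item in parsed_items if item[1] not in ALLOW_RETRY_ERROR_CODES]
--     return retry_items, bad_items
-- ===== SOURCE B (Python) =====
-- ALLOW_RETRY_ERROR_CODES = [
--     "ProvisionedThroughputExceededException",
--     "ThrottlingException",
--     "ServiceUnavailable",
--     "ProvisionedThroughputExceededException",
--     "RequestExpired",
-- ]
--
-- def _parse_kinesis_results_to_lists(kinesis_result):
--     retry_items, bad_items = [], []
--     for index, item in enumerate(kinesis_result.get("Records", [])):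
--         code = item.get("ErrorCode")
--         if not code:
--             continue
--         if code in ALLOW_RETRY_ERROR_CODES:
--             retry_items.append((index, code))
--         else:
--             bad_items.append((index, code))
--     return retry_items, bad_items
-- ===== Notes on version B (the rewrite author's own statement) =====
-- stated objective: simpler
-- what changed: Replaces the intermediate parsed_items list plus two separate membership-filter passes with a single enumerate loop that reads each ErrorCode once and appends directly to the retry or bad accumulator.
import Mathlib
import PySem

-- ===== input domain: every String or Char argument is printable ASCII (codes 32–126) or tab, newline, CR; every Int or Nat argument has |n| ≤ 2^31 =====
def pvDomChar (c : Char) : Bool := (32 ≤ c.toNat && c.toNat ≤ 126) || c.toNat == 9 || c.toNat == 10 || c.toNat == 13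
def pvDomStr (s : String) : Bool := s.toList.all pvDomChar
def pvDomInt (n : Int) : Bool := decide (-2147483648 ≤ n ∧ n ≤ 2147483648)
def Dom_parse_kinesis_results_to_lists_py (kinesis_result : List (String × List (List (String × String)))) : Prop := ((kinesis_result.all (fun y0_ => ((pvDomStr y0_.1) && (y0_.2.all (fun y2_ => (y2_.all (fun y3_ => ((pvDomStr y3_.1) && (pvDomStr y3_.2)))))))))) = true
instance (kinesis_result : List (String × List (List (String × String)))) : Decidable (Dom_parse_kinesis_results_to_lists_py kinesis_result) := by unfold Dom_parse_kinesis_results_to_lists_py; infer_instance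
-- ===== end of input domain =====

-- B folds once over enumerate(Records), appending each truthy ErrorCode directly to the
-- retry or bad accumulator, instead of A's temporary parsed list plus two filter passes
-- (objective: simpler, one pass, no intermediate list).

-- shared primitive: dict.get(k) on an association list (first match)
def pvGet {ν : Type} (d : List (String × ν)) (k : String) : Option ν :=
  (d.find? (fun p => p.1 == k)).map (·.2)

def pvAllowRetryErrorCodes : List String :=
  ["ProvisionedThroughputExceededException", "ThrottlingException", "ServiceUnavailable",
   "ProvisionedThroughputExceededException", "RequestExpired"]

-- truthiness of an Optional[str]
def pvTruthy (o : Option String) : Bool := o.getD "" != ""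

-- ===== PORT A =====
-- comprehension body of parsed_items: keep (index, item.get("ErrorCode")) if it is truthy
def pvParsedOf (p : Int × List (String × String)) : Option (Int × String) :=
  let code := pvGet p.2 "ErrorCode"
  if pvTruthy code then some (p.1, code.getD "") else none

def parse_kinesis_results_to_lists_py (kinesis_result : List (String × List (List (String × String)))) : (List (Int × String)) × (List (Int × String)) :=
  let records := (pvGet kinesis_result "Records").getD []
  let parsed_items := (PySem.List.enumerate records).filterMap pvParsedOf
  let retry_items := parsed_items.filter (fun item => pvAllowRetryErrorCodes.contains item.2)
  let bad_items := parsed_items.filter (fun item => !pvAllowRetryErrorCodes.contains item.2)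
  (retry_items, bad_items)

-- ===== PORT B =====
-- loop body of B: dispatch one (index, item) onto the (retry, bad) accumulators
def pvStep (acc : (List (Int × String)) × (List (Int × String))) (p : Int × List (String × String)) : (List (Int × String)) × (List (Int × String)) :=
  match pvGet p.2 "ErrorCode" with
  | none => acc
  | some code =>
    if code == "" then acc
    else if pvAllowRetryErrorCodes.contains code then (acc.1 ++ [(p.1, code)], acc.2)
    else (acc.1, acc.2 ++ [(p.1, code)])

def parse_kinesis_results_to_lists_py_alt (kinesis_result : List (String × List (List (String × String)))) : (List (Int × String)) × (List (Int × String)) :=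
  let records := (pvGet kinesis_result "Records").getD []
  (PySem.List.enumerate records).foldl pvStep ([], [])

-- ===== PRECONDITION & SPEC =====
def Spec_parse_kinesis_results_to_lists_py (kinesis_result : List (String × List (List (String × String)))) (out : (List (Int × String)) × (List (Int × String))) : Prop := out = parse_kinesis_results_to_lists_py_alt kinesis_result
instance (kinesis_result : List (String × List (List (String × String)))) (out : (List (Int × String)) × (List (Int × String))) : Decidable (Spec_parse_kinesis_results_to_lists_py kinesis_result out) := by unfold Spec_parse_kinesis_results_to_lists_py; infer_instance

-- ===== CLAIM (what is proved, stated in full; the proofs are below) =====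
def Claim_equal_parse_kinesis_results_to_lists_py : Prop := ∀ (kinesis_result : List (String × List (List (String × String)))), Dom_parse_kinesis_results_to_lists_py kinesis_result → Spec_parse_kinesis_results_to_lists_py kinesis_result (parse_kinesis_results_to_lists_py kinesis_result)

-- ===== LEMMAS AND PROOFS =====

-- loop invariant: B's fold extends the accumulators by exactly A's two filtered lists
theorem pvFold_split (l : List (Int × List (String × String))) (r b : List (Int × String)) :
    l.foldl pvStep (r, b) =
      (r ++ (l.filterMap pvParsedOf).filter (fun item => pvAllowRetryErrorCodes.contains item.2),
       b ++ (l.filterMap pvParsedOf).filter (fun item => !pvAllowRetryErrorCodes.contains item.2)) := by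
  induction l generalizing r b with
  | nil => simp
  | cons p l ih =>
    simp only [List.foldl_cons, List.filterMap_cons]
    cases h : pvGet p.2 "ErrorCode" with
    | none =>
      simp [pvStep, pvParsedOf, h, pvTruthy, ih]
    | some code =>
      by_cases hc : code = ""
      · subst hc; simp [pvStep, pvParsedOf, h, pvTruthy, ih]
      · by_cases hr : code ∈ pvAllowRetryErrorCodes
        · simp [pvStep, pvParsedOf, h, pvTruthy, hc, hr, ih]
        · simp [pvStep, pvParsedOf, h, pvTruthy, hc, hr, ih]

-- ===== VERDICT (by name: the statement is the Claim_ definition above) =====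
theorem parse_kinesis_results_to_lists_py_spec : Claim_equal_parse_kinesis_results_to_lists_py := by
  intro kr _
  show _ = _
  unfold parse_kinesis_results_to_lists_py parse_kinesis_results_to_lists_py_alt
  rw [pvFold_split]
  simp
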